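-- pv_equiv track=rewrite | github.com/faustroland/RecRoom-Shirt-Printer | AI_script.py | addOnes
-- ===== SOURCE A (Python) =====
-- def addOnes(string):
--   # Initialize empty lists for numbers and characters
--
--   newstring:str=""
--
--   # Initialize a variable to store the current number
--   current_number = ""
--
--   # Iterate over each character in the string
--   for char in string:
--     # Check if the character is a digit
--     if char.isdecimal():
--       # If it is a digit, add it to the current number
--       current_number += char
--     else:
--       # If it is not a digit, append the current number (if it is not empty) to the numbers list and reset the current number
--       if current_number:
--         newstring+=current_number
--         current_number = ""
--       # Append the character to the characters list
--       if newstring[len(newstring)-1].isdecimal():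
--         newstring+=char
--       else:
--         newstring+="1"+char
--
--   # After the loop is finished, check if there is a remaining number (if the string ends with a number)
--   if current_number:
--     newstring+=current_number
--
--   # Return the numbers and characters lists
--   return newstring
-- ===== SOURCE B (Python) =====
-- def addOnes(string):
--   # Single pass with a boolean "previous char was a digit" flag: prepend '1'
--   # to any non-digit char not immediately preceded by a digit.
--   out = []
--   prev_dec = False
--   for ch in string:
--     if not ch.isdecimal() and not prev_dec:
--       out.append('1')
--     out.append(ch)
--     prev_dec = ch.isdecimal()
--   return ''.join(out)
-- ===== Notes on version B (the rewrite author's own statement) =====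
-- stated objective: simpler
-- what changed: Replaces A's digit-run buffering with flush-and-inspect-last-output-char by a single pass carrying only a boolean prev-was-digit flag and joining a list of pieces.
import Mathlib
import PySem

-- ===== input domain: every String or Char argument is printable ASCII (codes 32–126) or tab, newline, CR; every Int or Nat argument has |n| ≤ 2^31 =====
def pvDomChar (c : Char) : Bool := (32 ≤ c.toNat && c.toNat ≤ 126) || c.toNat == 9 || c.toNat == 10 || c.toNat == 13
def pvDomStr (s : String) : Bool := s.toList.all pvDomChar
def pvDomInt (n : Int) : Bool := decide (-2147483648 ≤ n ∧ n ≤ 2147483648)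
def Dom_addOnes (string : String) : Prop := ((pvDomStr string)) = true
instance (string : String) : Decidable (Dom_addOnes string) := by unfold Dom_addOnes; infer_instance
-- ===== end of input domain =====

-- B replaces A's digit-run buffering and last-output-char inspection by a single
-- pass carrying a boolean "previous char was a digit" flag (objective: simpler).

-- ===== PORT A =====
-- A's loop: state (newstring, current_number); on Dom all chars are ASCII, where
-- Python's isdecimal coincides with PySem.Chars.isdigit (exactly '0'..'9').
def addOnesGo : List Char → List Char → List Char → List Char
  | [], ns, cur => if cur ≠ [] then ns ++ cur else ns
  | c :: rest, ns, cur =>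
    if PySem.Chars.isdigit c then
      addOnesGo rest ns (cur ++ [c])
    else
      let ns' := if cur ≠ [] then ns ++ cur else ns
      -- newstring[len(newstring)-1]; Python raises IndexError when ns' = [] (outside Pre_)
      match PySem.List.pyGet? ns' ((ns'.length : Int) - 1) with
      | some d =>
        if PySem.Chars.isdigit d then addOnesGo rest (ns' ++ [c]) []
        else addOnesGo rest (ns' ++ ['1', c]) []
      | none => []

def addOnes (string : String) : String :=
  String.ofList (addOnesGo string.toList [] [])

-- ===== PORT B =====
def addOnes_alt (string : String) : String :=
  String.ofList
    (string.toList.foldl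
      (fun (acc : List Char × Bool) ch =>
        ((if ¬ PySem.Chars.isdigit ch ∧ ¬ acc.2 then acc.1 ++ ['1'] else acc.1) ++ [ch],
         PySem.Chars.isdigit ch))
      ([], false)).1

-- ===== PRECONDITION & SPEC =====
-- Pre_ excludes exactly the strings starting with a non-digit, on which A raises IndexError.
def Pre_addOnes (string : String) : Prop :=
  PySem.Chars.isdigit (string.toList.headD '0') = true
instance (string : String) : Decidable (Pre_addOnes string) := by unfold Pre_addOnes; infer_instance

def pvWitness_addOnes : String := "12ab34"

def Spec_addOnes (string : String) (out : String) : Prop := out = addOnes_alt string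
instance (string : String) (out : String) : Decidable (Spec_addOnes string out) := by unfold Spec_addOnes; infer_instance

-- ===== CLAIM (what is proved, stated in full; the proofs are below) =====
def Claim_equal_addOnes : Prop := ∀ (string : String), Dom_addOnes string → Pre_addOnes string → Spec_addOnes string (addOnes string)

-- ===== LEMMAS AND PROOFS =====

-- Reference recursion for B, threading the "previous char was a digit" flag.
def bGo (prev : Bool) : List Char → List Char
  | [] => []
  | c :: rest =>
      (if PySem.Chars.isdigit c || prev then [c] else ['1', c]) ++
        bGo (PySem.Chars.isdigit c) rest

theorem foldl_eq_bGo (l : List Char) :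
    ∀ (out : List Char) (prev : Bool),
      (l.foldl
        (fun (acc : List Char × Bool) ch =>
          ((if ¬ PySem.Chars.isdigit ch ∧ ¬ acc.2 then acc.1 ++ ['1'] else acc.1) ++ [ch],
           PySem.Chars.isdigit ch))
        (out, prev)).1 = out ++ bGo prev l := by
  induction l with
  | nil => intro out prev; simp [bGo]
  | cons c rest ih =>
      intro out prev
      simp only [List.foldl, bGo]
      rw [ih]
      by_cases hc : PySem.Chars.isdigit c = true <;>
        cases prev <;> simp [hc]

theorem addOnesGo_eq_bGo (l : List Char) :
    ∀ (ns cur : List Char) (d : Char), (ns ++ cur).getLast? = some d →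
      addOnesGo l ns cur = (ns ++ cur) ++ bGo (PySem.Chars.isdigit d) l := by
  induction l with
  | nil =>
      intro ns cur d _
      rcases eq_or_ne cur [] with h | h <;> simp [addOnesGo, bGo, h]
  | cons c rest ih =>
      intro ns cur d hd
      have hne : ns ++ cur ≠ [] := by
        intro h; rw [h] at hd; simp at hd
      by_cases hc : PySem.Chars.isdigit c = true
      · have hd' : (ns ++ (cur ++ [c])).getLast? = some c := by
          simp [← List.append_assoc]
        simp only [addOnesGo, hc, if_true]
        rw [ih ns (cur ++ [c]) c hd']
        simp [bGo, hc, List.append_assoc]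
      · have hns' : (if cur ≠ [] then ns ++ cur else ns) = ns ++ cur := by
          rcases eq_or_ne cur [] with h | h <;> simp [h]
        have hget : PySem.List.pyGet? (ns ++ cur) (((ns ++ cur).length : Int) - 1)
            = some d := by
          have h1 : ((ns ++ cur).length : Int) - 1 = (((ns ++ cur).length - 1 : Nat) : Int) := by
            have : 1 ≤ (ns ++ cur).length := List.length_pos_iff.mpr hne
            omega
          rw [h1, PySem.List.pyGet?_natCast, ← List.getLast?_eq_getElem?]
          exact hd
        simp only [addOnesGo, hc, hns', hget]
        by_cases hdd : PySem.Chars.isdigit d = true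
        · rw [hdd, if_pos rfl]
          rw [ih (ns ++ cur ++ [c]) [] c (by simp)]
          simp [bGo, hc, List.append_assoc]
        · rw [eq_false_of_ne_true hdd]
          simp only [Bool.false_eq_true, if_false]
          rw [ih (ns ++ cur ++ ['1', c]) [] c (by simp)]
          simp [bGo, hc, List.append_assoc]

-- ===== VERDICT (by name: the statement is the Claim_ definition above) =====
theorem addOnes_spec : Claim_equal_addOnes := by
  intro s _ hpre
  unfold Spec_addOnes addOnes addOnes_alt
  cases hcs : s.toList with
  | nil => rfl
  | cons c rest =>
      have hc : PySem.Chars.isdigit c = true := by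
        unfold Pre_addOnes at hpre; rw [hcs] at hpre; exact hpre
      have ha : addOnesGo (c :: rest) [] [] = [c] ++ bGo (PySem.Chars.isdigit c) rest := by
        simp only [addOnesGo, hc, if_true, List.nil_append]
        rw [addOnesGo_eq_bGo rest [] [c] c (by simp)]
        simp [hc]
      have hb := foldl_eq_bGo (c :: rest) [] false
      simp only [bGo] at hb
      rw [ha, hb]
      simp [hc]
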